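-- pv_equiv track=rewrite | github.com/wink4u/Algorithm | 프로그래머스/파이썬/Lv2/롤케이크 자르기.py | solution
-- ===== SOURCE A (Python) =====
-- from collections import defaultdict
--
-- def solution(topping):
--     answer = 0
--
--     toppings = defaultdict(int)
--     compare = defaultdict(int)
--
--     for i in topping:
--         toppings[i] += 1
--
--     for i in topping:
--         toppings[i] -= 1
--         compare[i] += 1
--         if toppings[i] == 0:
--             del toppings[i]
--
--
--         if len(toppings) == len(compare):
--             answer += 1
--
--     return answer
-- ===== SOURCE B (Python) =====
-- def solution(topping):
--     # backward pass: right[i] = number of distinct toppings in topping[i:]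
--     right = [0]
--     seen = set()
--     for x in reversed(topping):
--         seen.add(x)
--         right.append(len(seen))
--     right.reverse()
--     # forward pass: grow the left set, compare against the precomputed suffix counts
--     ans = 0
--     left = set()
--     for x, r in zip(topping, right[1:]):
--         left.add(x)
--         if len(left) == r:
--             ans += 1
--     return ans
-- ===== Notes on version B (the rewrite author's own statement) =====
-- stated objective: alternative
-- what changed: A's single interleaved pass with two count-dicts (decrementing a global counter while growing a prefix counter) is replaced by two differently-shaped passes: a backward pass precomputing the suffix distinct-count table with a set, then a forward pass growing a left set and comparing against the table.
import Mathlib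
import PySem

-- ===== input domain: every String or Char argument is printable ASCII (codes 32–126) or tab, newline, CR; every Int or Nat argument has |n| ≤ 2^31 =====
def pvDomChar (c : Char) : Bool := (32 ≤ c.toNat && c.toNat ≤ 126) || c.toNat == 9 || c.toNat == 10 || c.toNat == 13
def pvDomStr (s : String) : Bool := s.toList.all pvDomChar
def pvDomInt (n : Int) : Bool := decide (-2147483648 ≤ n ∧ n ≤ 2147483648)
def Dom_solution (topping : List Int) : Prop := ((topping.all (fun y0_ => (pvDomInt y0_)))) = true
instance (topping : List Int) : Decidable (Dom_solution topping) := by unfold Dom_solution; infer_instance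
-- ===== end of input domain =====

-- B replaces A's single interleaved two-dict pass by a backward pass precomputing suffix distinct
-- counts plus a forward pass over a growing left set (alternative decomposition; same O(n)).

-- ===== PORT A =====
-- loop body of A's second 'for i in topping' loop (state: answer, toppings, compare)
def stepA (s : Int × PySem.Dict Int Int × PySem.Dict Int Int) (i : Int) :
    Int × PySem.Dict Int Int × PySem.Dict Int Int :=
  let toppings := s.2.1.modify i 0 (· - 1)          -- toppings[i] -= 1
  let compare := s.2.2.modify i 0 (· + 1)           -- compare[i] += 1
  let toppings := if toppings.getD i 0 = 0 then toppings.erase i else toppings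
                                                    -- if toppings[i] == 0: del toppings[i]
  (if toppings.size = compare.size then s.1 + 1 else s.1, toppings, compare)

def solution (topping : List Int) : Int :=
  -- first loop: toppings[i] += 1 over a defaultdict(int)
  let toppings := topping.foldl (fun d i => d.modify i 0 (· + 1)) PySem.Dict.empty
  (topping.foldl stepA (0, toppings, PySem.Dict.empty)).1

-- ===== PORT B =====
-- body of B's backward pass: seen.add(x); right.append(len(seen))
def stepR (s : List Int × PySem.Set Int) (x : Int) : List Int × PySem.Set Int :=
  let seen := PySem.Set.add s.2 x
  (s.1 ++ [(seen.length : Int)], seen)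

-- body of B's forward pass over zip(topping, right[1:]): left.add(x); if len(left) == r: ans += 1
def stepB (s : PySem.Set Int × Int) (p : Int × Int) : PySem.Set Int × Int :=
  let left := PySem.Set.add s.1 p.1
  (left, if (left.length : Int) = p.2 then s.2 + 1 else s.2)

def solution_alt (topping : List Int) : Int :=
  let right := (topping.reverse.foldl stepR ([0], PySem.Set.ofList [])).1.reverse
  -- right[1:] is right.tail (right is built non-empty)
  ((topping.zip right.tail).foldl stepB (PySem.Set.ofList [], 0)).2

-- ===== PRECONDITION & SPEC =====
def Spec_solution (topping : List Int) (out : Int) : Prop := out = solution_alt topping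
instance (topping : List Int) (out : Int) : Decidable (Spec_solution topping out) := by unfold Spec_solution; infer_instance

-- ===== CLAIM (what is proved, stated in full; the proofs are below) =====
def Claim_equal_solution : Prop := ∀ (topping : List Int), Dom_solution topping → Spec_solution topping (solution topping)

-- ===== LEMMAS AND PROOFS =====

-- the exact list [d(xs[0:]), d(xs[1:]), …, 0] of suffix distinct counts that B's backward pass builds
def fullTable : List Int → List Int
  | [] => [0]
  | x :: xs => ((x :: xs).toFinset.card : Int) :: fullTable xs

-- a nodup list with the same members as xs has length xs.toFinset.card
lemma distinct_len (l xs : List Int) (hnd : l.Nodup) (hm : ∀ k, k ∈ l ↔ k ∈ xs) :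
    l.length = xs.toFinset.card := by
  have : l.toFinset = xs.toFinset := by
    ext k; simp [List.mem_toFinset, hm]
  rw [← this, List.toFinset_card_of_nodup hnd]

lemma ofList_len (xs : List Int) : (PySem.Set.ofList xs).length = xs.toFinset.card :=
  distinct_len _ xs (PySem.Set.nodup_ofList xs) (fun k => PySem.Set.mem_ofList xs k)

lemma ofList_append_singleton (p : List Int) (x : Int) :
    PySem.Set.ofList (p ++ [x]) = PySem.Set.add (PySem.Set.ofList p) x := by
  simp [PySem.Set.ofList_eq_foldl, List.foldl_append]

-- PySem has no erase lemmas; lookup after erase, from the filter definition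
lemma get?_erase (d : PySem.Dict Int Int) (k k' : Int) :
    (d.erase k).get? k' = if k' = k then none else d.get? k' := by
  rcases d with ⟨items⟩
  simp only [PySem.Dict.erase, PySem.Dict.get?]
  induction items with
  | nil => simp
  | cons p rest ih =>
    rw [List.filter_cons]
    by_cases hk : p.1 = k
    · rw [if_neg (by simp [hk]), ih]
      by_cases h : k' = k
      · rw [if_pos h, if_pos h]
      · rw [if_neg h, if_neg h, List.find?_cons_of_neg (by simp [hk]; exact fun e => h e.symm)]
    · rw [if_pos (by simp [hk])]
      by_cases hq : p.1 = k'
      · have hne : ¬ k' = k := fun e => hk (hq.trans e)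
        rw [List.find?_cons_of_pos (by simp [hq]), if_neg hne,
          List.find?_cons_of_pos (by simp [hq])]
      · rw [List.find?_cons_of_neg (by simp [hq]), ih,
          List.find?_cons_of_neg (by simp [hq])]

lemma keys_erase_sublist (d : PySem.Dict Int Int) (k : Int) :
    (d.erase k).keys.Sublist d.keys := by
  rcases d with ⟨items⟩
  exact List.Sublist.map _ List.filter_sublist

lemma size_eq_card (d : PySem.Dict Int Int) (xs : List Int) (hnd : d.keys.Nodup)
    (hc : ∀ k, d.contains k = true ↔ k ∈ xs) : d.size = xs.toFinset.card := by
  have hlen : d.keys.length = xs.toFinset.card :=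
    distinct_len _ xs hnd (fun k => by rw [← PySem.Dict.contains_iff_mem_keys]; exact hc k)
  simpa [PySem.Dict.size, PySem.Dict.keys] using hlen

-- the invariant of A's `toppings` dict across one loop step: it holds the counts of the
-- not-yet-processed suffix, zero-count keys deleted
lemma stepA_t (x : Int) (xs : List Int) (t : PySem.Dict Int Int)
    (hnd : t.keys.Nodup)
    (hg : ∀ k, t.getD k 0 = ((x :: xs).count k : Int))
    (hc : ∀ k, t.contains k = true ↔ k ∈ x :: xs) :
    (if (t.modify x 0 (· - 1)).getD x 0 = 0
      then (t.modify x 0 (· - 1)).erase x else t.modify x 0 (· - 1)).keys.Nodup ∧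
    (∀ k, (if (t.modify x 0 (· - 1)).getD x 0 = 0
      then (t.modify x 0 (· - 1)).erase x else t.modify x 0 (· - 1)).getD k 0 = (xs.count k : Int)) ∧
    (∀ k, (if (t.modify x 0 (· - 1)).getD x 0 = 0
      then (t.modify x 0 (· - 1)).erase x else t.modify x 0 (· - 1)).contains k = true ↔ k ∈ xs) := by
  have hg1 : ∀ k, (t.modify x 0 (· - 1)).getD k 0 = (xs.count k : Int) := by
    intro k
    rw [PySem.Dict.getD_modify]
    by_cases h : k = x
    · subst h; rw [hg k]; simp
    · rw [if_neg h, hg k]; simp [Ne.symm h]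
  have hc1 : ∀ k, (t.modify x 0 (· - 1)).contains k = (k == x || t.contains k) := fun k =>
    PySem.Dict.contains_modify t x k 0 (· - 1)
  have hnd1 : (t.modify x 0 (· - 1)).keys.Nodup := by
    rw [PySem.Dict.keys_modify]
    exact PySem.Dict.nodup_keys_insert _ _ _ hnd
  have hcond : ((t.modify x 0 (· - 1)).getD x 0 = 0) ↔ x ∉ xs := by
    rw [hg1 x]
    constructor
    · intro h
      exact List.count_eq_zero.mp (by exact_mod_cast h)
    · intro h; rw [List.count_eq_zero.mpr h]; rfl
  by_cases hx : x ∈ xs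
  · rw [if_neg (fun h => (hcond.mp h) hx)]
    refine ⟨hnd1, hg1, fun k => ?_⟩
    rw [hc1 k]
    by_cases h : k = x
    · subst h; simp [hx]
    · simp only [Bool.or_eq_true, beq_iff_eq]
      rw [hc k]; simp [List.mem_cons, h]
  · rw [if_pos (hcond.mpr hx)]
    refine ⟨(keys_erase_sublist _ x).nodup hnd1, fun k => ?_, fun k => ?_⟩
    · rw [PySem.Dict.getD_eq_get?_getD, get?_erase]
      by_cases h : k = x
      · subst h; simp [List.count_eq_zero.mpr hx]
      · rw [if_neg h, ← PySem.Dict.getD_eq_get?_getD]; exact hg1 k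
    · rw [PySem.Dict.contains_eq_isSome_get?, get?_erase]
      by_cases h : k = x
      · subst h; simp [hx]
      · rw [if_neg h, ← PySem.Dict.contains_eq_isSome_get?, hc1 k]
        simp only [Bool.or_eq_true, beq_iff_eq]
        rw [hc k]; simp [List.mem_cons, h]

lemma zip_tail_fullTable (x : Int) (xs : List Int) :
    (x :: xs).zip ((fullTable (x :: xs)).tail)
      = (x, (xs.toFinset.card : Int)) :: xs.zip ((fullTable xs).tail) := by
  cases xs <;> simp [fullTable]

-- the main simultaneous induction: A's loop state (suffix counter `toppings`, prefix counter
-- `compare`) versus B's loop state (left set of the prefix, precomputed suffix counts)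
lemma main_loop (xs : List Int) : ∀ (p : List Int) (ans : Int) (t : PySem.Dict Int Int),
    t.keys.Nodup →
    (∀ k, t.getD k 0 = (xs.count k : Int)) →
    (∀ k, t.contains k = true ↔ k ∈ xs) →
    (xs.foldl stepA (ans, t, PySem.Dict.counter p)).1
      = ((xs.zip ((fullTable xs).tail)).foldl stepB (PySem.Set.ofList p, ans)).2 := by
  induction xs with
  | nil => intro p ans t _ _ _; rfl
  | cons x xs ih =>
    intro p ans t hnd hg hc
    obtain ⟨hnd2, hg2, hc2⟩ := stepA_t x xs t hnd hg hc
    rw [zip_tail_fullTable]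
    simp only [List.foldl_cons]
    have hstep : stepA (ans, t, PySem.Dict.counter p) x
        = (if ((PySem.Set.ofList (p ++ [x])).length : Int) = (xs.toFinset.card : Int)
             then ans + 1 else ans,
           (if (t.modify x 0 (· - 1)).getD x 0 = 0
              then (t.modify x 0 (· - 1)).erase x else t.modify x 0 (· - 1)),
           PySem.Dict.counter (p ++ [x])) := by
      have hc1 : ((PySem.Dict.counter p).modify x 0 (· + 1)) = PySem.Dict.counter (p ++ [x]) :=
        (PySem.Dict.counter_append_singleton p x).symm
      have hsize : (if (t.modify x 0 (· - 1)).getD x 0 = 0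
          then (t.modify x 0 (· - 1)).erase x else t.modify x 0 (· - 1)).size
          = xs.toFinset.card := size_eq_card _ xs hnd2 hc2
      have hcsize : (PySem.Dict.counter (p ++ [x])).size
          = (PySem.Set.ofList (p ++ [x])).length := by
        simp only [PySem.Dict.size, PySem.Dict.items_counter, List.length_map]
      show (if (if (t.modify x 0 (· - 1)).getD x 0 = 0
              then (t.modify x 0 (· - 1)).erase x else t.modify x 0 (· - 1)).size
              = ((PySem.Dict.counter p).modify x 0 (· + 1)).size then ans + 1 else ans,
            (if (t.modify x 0 (· - 1)).getD x 0 = 0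
              then (t.modify x 0 (· - 1)).erase x else t.modify x 0 (· - 1)),
            ((PySem.Dict.counter p).modify x 0 (· + 1))) = _
      rw [hc1, hsize, hcsize]
      refine congrArg (fun a => (a, _, _)) ?_
      exact if_congr (by omega) rfl rfl
    rw [hstep, ih (p ++ [x]) _ _ hnd2 hg2 hc2]
    have hstepB : stepB (PySem.Set.ofList p, ans) (x, (xs.toFinset.card : Int))
        = (PySem.Set.ofList (p ++ [x]),
           if ((PySem.Set.ofList (p ++ [x])).length : Int) = (xs.toFinset.card : Int)
             then ans + 1 else ans) := by
      simp only [stepB, ofList_append_singleton]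
    rw [hstepB]

lemma foldl_stepR_snd (l : List Int) : ∀ (s : List Int × PySem.Set Int),
    (l.foldl stepR s).2 = l.foldl PySem.Set.add s.2 := by
  induction l with
  | nil => intro s; rfl
  | cons x xs ih => intro s; simp only [List.foldl_cons]; rw [ih]; rfl

-- B's backward pass builds exactly (fullTable topping).reverse
lemma bw_fst (t : List Int) :
    (t.reverse.foldl stepR ([0], PySem.Set.ofList [])).1 = (fullTable t).reverse := by
  induction t with
  | nil => rfl
  | cons x xs ih =>
    rw [List.reverse_cons, List.foldl_append]
    simp only [List.foldl_cons, List.foldl_nil]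
    have hsnd : (xs.reverse.foldl stepR ([0], PySem.Set.ofList [])).2
        = PySem.Set.ofList xs.reverse := by
      rw [foldl_stepR_snd, PySem.Set.ofList_eq_foldl]; rfl
    have hlen : (PySem.Set.add (PySem.Set.ofList xs.reverse) x).length
        = (x :: xs).toFinset.card := by
      rw [← ofList_append_singleton, ofList_len]
      congr 1
      ext k; simp [List.mem_toFinset]
    show (xs.reverse.foldl stepR ([0], PySem.Set.ofList [])).1
        ++ [((PySem.Set.add ((xs.reverse.foldl stepR ([0], PySem.Set.ofList [])).2) x).length : Int)]
      = (fullTable (x :: xs)).reverse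
    rw [ih, hsnd, hlen]
    simp [fullTable]

lemma solution_alt_eq (t : List Int) :
    solution_alt t = ((t.zip ((fullTable t).tail)).foldl stepB (PySem.Set.ofList [], 0)).2 := by
  simp only [solution_alt]
  rw [bw_fst, List.reverse_reverse]

-- ===== VERDICT (by name: the statement is the Claim_ definition above) =====
theorem solution_spec : Claim_equal_solution := by
  unfold Claim_equal_solution
  intro topping _
  unfold Spec_solution
  have h1 : solution topping
      = (topping.foldl stepA (0, PySem.Dict.counter topping, PySem.Dict.counter [])).1 := by
    simp only [solution]
    rw [PySem.Dict.counter_eq_foldl]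
    rfl
  rw [h1, main_loop topping [] 0 (PySem.Dict.counter topping)
    (PySem.Dict.nodup_keys_counter _)
    (fun k => PySem.Dict.getD_counter _ _)
    (fun k => by rw [PySem.Dict.contains_counter]; simp),
    solution_alt_eq]
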